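-- pv_equiv track=rewrite | github.com/Tsubasa10wtz/athena_utils | lakebench/join/util/test.py | longest_simple_balanced_subsequence
-- ===== SOURCE A (Python) =====
-- from collections import defaultdict
--
-- def longest_simple_balanced_subsequence(seq):
--     count = defaultdict(int)
--     max_len = 0
--     left = 0
--     max_start = 0
--     max_end = 0
--
--     for right, item in enumerate(seq):
--         count[item] += 1
--
--         while True:
--             current_counts = list(count.values())
--             if not current_counts:
--                 break
--             max_count = max(current_counts)
--             min_count = min(current_counts)
--             if max_count - min_count <= 1:
--                 break
--             # 否则收缩左边界
--             left_item = seq[left]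
--             count[left_item] -= 1
--             if count[left_item] == 0:
--                 del count[left_item]
--             left += 1
--
--         if right - left + 1 > max_len:
--             max_len = right - left + 1
--             max_start = left
--             max_end = right
--
--     return max_len, max_start, max_end
-- ===== SOURCE B (Python) =====
-- def longest_simple_balanced_subsequence(seq):
--     # O(n): count-of-counts dict + distinct-item counter make the balance
--     # test O(1) instead of scanning all counts each shrink step.
--     count = {}   # item -> occurrences in window (zeros kept)
--     freq = {}    # c -> number of distinct items with exactly c occurrences (zeros kept)
--     k = 0        # number of distinct items in window
--     best_len = 0
--     best_start = 0
--     best_end = 0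
--     left = 0
--     for right, item in enumerate(seq):
--         c = count.get(item, 0)
--         count[item] = c + 1
--         if c == 0:
--             k += 1
--         else:
--             freq[c] = freq[c] - 1
--         freq[c + 1] = freq.get(c + 1, 0) + 1
--         # window is balanced iff every count is q or q+1, q = size // k
--         while True:
--             q = (right - left + 1) // k
--             if freq.get(q, 0) + freq.get(q + 1, 0) == k:
--                 break
--             x = seq[left]
--             cx = count[x]
--             count[x] = cx - 1
--             freq[cx] = freq[cx] - 1
--             if cx == 1:
--                 k -= 1
--             else:
--                 freq[cx - 1] = freq.get(cx - 1, 0) + 1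
--             left += 1
--         if right - left + 1 > best_len:
--             best_len = right - left + 1
--             best_start = left
--             best_end = right
--     return best_len, best_start, best_end
-- ===== Notes on version B (the rewrite author's own statement) =====
-- stated objective: faster
-- what changed: A rescans all window counts (list(count.values()) plus max/min) on every shrink-test, O(distinct) per step; B maintains a count-of-counts dict and a distinct-item counter so the balance test becomes the O(1) check freq[size//k] + freq[size//k + 1] == k, giving one O(n) pass overall.
import Mathlib
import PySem

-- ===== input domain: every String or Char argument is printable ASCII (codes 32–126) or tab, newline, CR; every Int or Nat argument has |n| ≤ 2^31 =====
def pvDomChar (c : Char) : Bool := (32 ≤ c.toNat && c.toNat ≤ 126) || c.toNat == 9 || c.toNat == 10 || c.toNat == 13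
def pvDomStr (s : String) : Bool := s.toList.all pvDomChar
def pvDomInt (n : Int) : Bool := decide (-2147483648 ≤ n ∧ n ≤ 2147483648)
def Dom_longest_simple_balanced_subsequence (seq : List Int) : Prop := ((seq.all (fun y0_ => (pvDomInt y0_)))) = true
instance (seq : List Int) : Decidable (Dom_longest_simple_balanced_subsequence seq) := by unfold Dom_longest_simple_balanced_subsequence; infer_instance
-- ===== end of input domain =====

-- B replaces A's O(window)-per-step rescan of all counts (list(count.values()), max, min)
-- by a count-of-counts dict plus a distinct counter, making the balance test O(1).

-- ===== PORT A =====
-- the 'while True' shrink loop; fuel seq.length + 1 bounds its iterations (each one advances left inside the window)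
def shrinkA (seq : List Int) : Nat → PySem.Dict Int Int → Int → PySem.Dict Int Int × Int
  | 0, count, left => (count, left)
  | fuel+1, count, left =>
    let vs := count.values
    if vs = [] then (count, left)
    else if ((PySem.List.max? vs (fun v => v)).getD 0) - ((PySem.List.min? vs (fun v => v)).getD 0) ≤ 1 then
      (count, left)
    else
      -- seq[left]: left is always in range when this branch is reached
      let li := (PySem.List.pyGet? seq left).getD 0
      let c := count.getD li 0 - 1
      shrinkA seq fuel (if c = 0 then count.erase li else count.insert li c) (left + 1)

def goA (seq : List Int) : List Int → Int → PySem.Dict Int Int → Int → Int → Int → Int → List Int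
  | [], _, _, _, maxLen, maxStart, maxEnd => [maxLen, maxStart, maxEnd]
  | item :: rest, right, count, left, maxLen, maxStart, maxEnd =>
    let count1 := count.insert item (count.getD item 0 + 1)
    let sp := shrinkA seq (seq.length + 1) count1 left
    if right - sp.2 + 1 > maxLen then
      goA seq rest (right + 1) sp.1 sp.2 (right - sp.2 + 1) sp.2 right
    else
      goA seq rest (right + 1) sp.1 sp.2 maxLen maxStart maxEnd

def longest_simple_balanced_subsequence (seq : List Int) : List Int :=
  goA seq seq 0 PySem.Dict.empty 0 0 0 0

-- ===== PORT B =====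
-- the 'while True' loop of B; state (count, freq, k, left); fuel as in A
def shrinkB (seq : List Int) : Nat → PySem.Dict Int Int → PySem.Dict Int Int → Int → Int → Int → PySem.Dict Int Int × PySem.Dict Int Int × Int × Int
  | 0, count, freq, k, left, _ => (count, freq, k, left)
  | fuel+1, count, freq, k, left, right =>
    let q := PySem.Int.floordiv (right - left + 1) k
    if freq.getD q 0 + freq.getD (q+1) 0 = k then (count, freq, k, left)
    else
      -- seq[left], count[x], freq[cx]: present on every reachable state
      let x := (PySem.List.pyGet? seq left).getD 0
      let cx := count.getD x 0
      let count' := count.insert x (cx - 1)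
      let freq1 := freq.insert cx (freq.getD cx 0 - 1)
      if cx = 1 then shrinkB seq fuel count' freq1 (k - 1) (left + 1) right
      else shrinkB seq fuel count' (freq1.insert (cx - 1) (freq1.getD (cx - 1) 0 + 1)) k (left + 1) right

def goB (seq : List Int) : List Int → Int → PySem.Dict Int Int → PySem.Dict Int Int → Int → Int → Int → Int → Int → List Int
  | [], _, _, _, _, _, bestLen, bestStart, bestEnd => [bestLen, bestStart, bestEnd]
  | item :: rest, right, count, freq, k, left, bestLen, bestStart, bestEnd =>
    let c := count.getD item 0
    let count1 := count.insert item (c + 1)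
    let k1 := if c = 0 then k + 1 else k
    let freq1 := if c = 0 then freq else freq.insert c (freq.getD c 0 - 1)
    let freq2 := freq1.insert (c + 1) (freq1.getD (c + 1) 0 + 1)
    let st := shrinkB seq (seq.length + 1) count1 freq2 k1 left right
    if right - st.2.2.2 + 1 > bestLen then
      goB seq rest (right + 1) st.1 st.2.1 st.2.2.1 st.2.2.2 (right - st.2.2.2 + 1) st.2.2.2 right
    else
      goB seq rest (right + 1) st.1 st.2.1 st.2.2.1 st.2.2.2 bestLen bestStart bestEnd

def longest_simple_balanced_subsequence_alt (seq : List Int) : List Int :=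
  goB seq seq 0 PySem.Dict.empty PySem.Dict.empty 0 0 0 0 0

-- ===== PRECONDITION & SPEC =====
def Spec_longest_simple_balanced_subsequence (seq : List Int) (out : List Int) : Prop := out = longest_simple_balanced_subsequence_alt seq
instance (seq : List Int) (out : List Int) : Decidable (Spec_longest_simple_balanced_subsequence seq out) := by unfold Spec_longest_simple_balanced_subsequence; infer_instance

-- ===== CLAIM (what is proved, stated in full; the proofs are below) =====
def Claim_equal_longest_simple_balanced_subsequence : Prop := ∀ (seq : List Int), Dom_longest_simple_balanced_subsequence seq → Spec_longest_simple_balanced_subsequence seq (longest_simple_balanced_subsequence seq)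

-- ===== LEMMAS AND PROOFS =====

-- the sliding window seq[l:r]
def window (seq : List Int) (l r : Nat) : List Int := (seq.drop l).take (r - l)

-- the balance predicate both loop conditions decide
def Bal (w : List Int) : Prop := ∀ x ∈ w, ∀ y ∈ w, w.count x ≤ w.count y + 1

-- number of distinct items occurring exactly v times in w
def occ (w : List Int) (v : Int) : Nat := (w.toFinset.filter (fun x => (w.count x : Int) = v)).card

def InvA (d : PySem.Dict Int Int) (w : List Int) : Prop :=
  d.keys.Nodup ∧ (∀ x, d.getD x 0 = (w.count x : Int)) ∧ (∀ x, d.contains x = true ↔ x ∈ w)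

def InvB (d f : PySem.Dict Int Int) (k : Int) (w : List Int) : Prop :=
  (∀ x, d.getD x 0 = (w.count x : Int)) ∧
  (∀ c : Int, 1 ≤ c → f.getD c 0 = (occ w c : Int)) ∧
  (∀ c : Int, c ≤ 0 → f.getD c 0 = 0) ∧
  k = (w.toFinset.card : Int)

lemma window_nil (seq : List Int) (l : Nat) : window seq l l = [] := by
  simp [window]

lemma window_length (seq : List Int) (l r : Nat) (h1 : l ≤ r) (h2 : r ≤ seq.length) :
    (window seq l r).length = r - l := by
  simp [window]; omega

lemma window_append (seq : List Int) (l r : Nat) (h1 : l ≤ r) (h2 : r < seq.length) :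
    window seq l (r + 1) = window seq l r ++ [seq[r]] := by
  unfold window
  have h3 : r + 1 - l = (r - l) + 1 := by omega
  rw [h3, List.take_add_one]
  have h4 : (seq.drop l)[r - l]? = some seq[r] := by
    rw [List.getElem?_drop]
    have : l + (r - l) = r := by omega
    rw [this, List.getElem?_eq_getElem h2]
  simp [h4]

lemma window_cons (seq : List Int) (l r : Nat) (h1 : l < r) (h3 : l < seq.length) :
    window seq l r = seq[l] :: window seq (l + 1) r := by
  unfold window
  rw [List.drop_eq_getElem_cons h3]
  have : r - l = (r - (l + 1)) + 1 := by omega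
  rw [this, List.take_succ_cons]

-- ---- facts about Dict.erase (PySem states none) ----

lemma getD_erase_self (d : PySem.Dict Int Int) (k : Int) (v : Int) : (d.erase k).getD k v = v := by
  cases d with
  | mk items =>
    simp [PySem.Dict.erase, PySem.Dict.getD, PySem.Dict.get?]
    induction items with
    | nil => simp
    | cons p t ih =>
      by_cases h : p.1 = k <;> simp [h] <;> simp_all

lemma getD_erase_of_ne (d : PySem.Dict Int Int) (k j v : Int) (h : j ≠ k) : (d.erase k).getD j v = d.getD j v := by
  cases d with
  | mk items =>
    simp [PySem.Dict.erase, PySem.Dict.getD, PySem.Dict.get?]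
    induction items with
    | nil => simp
    | cons p t ih =>
      by_cases hk : p.1 = k
      · simpa [hk, h.symm] using ih
      · by_cases hj : p.1 = j <;> simp [hk, hj] <;> simp_all

lemma contains_erase (d : PySem.Dict Int Int) (k j : Int) : (d.erase k).contains j = (!(j == k) && d.contains j) := by
  cases d with
  | mk items =>
    simp only [PySem.Dict.erase, PySem.Dict.contains]
    induction items with
    | nil => simp
    | cons p t ih =>
      by_cases hk : p.1 = k
      · by_cases hj : (j = k)
        · simp_all
        · simp_all [List.any_cons,
            show (k == j) = false from beq_eq_false_iff_ne.mpr (fun h => hj h.symm)]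
      · by_cases hj : p.1 = j <;> by_cases hjk : (j = k)
        · simp_all
        · simp_all [List.any_cons]
        · simp_all
        · simp_all [List.any_cons,
            show (p.1 == j) = false from beq_eq_false_iff_ne.mpr hj]

lemma keys_erase (d : PySem.Dict Int Int) (k : Int) : (d.erase k).keys = d.keys.filter (fun x => !(x == k)) := by
  cases d with
  | mk items =>
    simp [PySem.Dict.erase, PySem.Dict.keys]
    induction items with
    | nil => simp
    | cons p t ih =>
      by_cases hk : p.1 = k <;> simp [List.filter_cons, hk, ih]

-- ---- how occ and the distinct count react to appending one item ----

lemma occ_perm {w w' : List Int} (h : w.Perm w') (v : Int) : occ w v = occ w' v := by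
  unfold occ
  have hts : w.toFinset = w'.toFinset := by
    apply Finset.ext; intro x; simp [List.mem_toFinset, h.mem_iff]
  rw [hts]
  congr 1
  apply Finset.filter_congr
  intro x _
  simp [h.count_eq]

lemma occ_append_ne (w : List Int) (item : Int) (v : Int)
    (h1 : v ≠ ↑(w.count item)) (h2 : v ≠ ↑(w.count item) + 1) :
    occ (w ++ [item]) v = occ w v := by
  unfold occ
  congr 1
  apply Finset.ext
  intro x
  by_cases hx : x = item
  · subst hx
    simp only [Finset.mem_filter, List.mem_toFinset, List.mem_append, List.count_append,
      List.count_singleton, List.mem_singleton]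
    constructor
    · rintro ⟨_, hc⟩; exact absurd hc (by push_cast at h2 ⊢; omega)
    · rintro ⟨_, hc⟩; exact absurd hc (by push_cast at h1 ⊢; omega)
  · simp only [Finset.mem_filter, List.mem_toFinset, List.mem_append, List.count_append,
      List.mem_singleton, hx, or_false]
    have : List.count x [item] = 0 := List.count_eq_zero.mpr (by simp [hx])
    simp [this]

lemma occ_append_new (w : List Int) (item : Int) :
    occ (w ++ [item]) (↑(w.count item) + 1) = occ w (↑(w.count item) + 1) + 1 := by
  unfold occ
  have hset : (w ++ [item]).toFinset.filter (fun x => ((w ++ [item]).count x : Int) = ↑(w.count item) + 1)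
      = insert item (w.toFinset.filter (fun x => (w.count x : Int) = ↑(w.count item) + 1)) := by
    apply Finset.ext
    intro x
    by_cases hx : x = item
    · subst hx; simp [List.count_append]
    · have : List.count x [item] = 0 := List.count_eq_zero.mpr (by simp [hx])
      simp [List.count_append, hx, this]
  rw [hset, Finset.card_insert_of_notMem (by simp)]

lemma occ_append_cur (w : List Int) (item : Int) (h : 1 ≤ w.count item) :
    occ (w ++ [item]) ↑(w.count item) = occ w ↑(w.count item) - 1 ∧ 1 ≤ occ w ↑(w.count item) := by
  unfold occ
  have hiw : item ∈ w := by rw [← List.count_pos_iff]; omega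
  have hmem : item ∈ w.toFinset.filter (fun x => (w.count x : Int) = ↑(w.count item)) := by
    simp [hiw]
  have hset : (w ++ [item]).toFinset.filter (fun x => ((w ++ [item]).count x : Int) = ↑(w.count item))
      = (w.toFinset.filter (fun x => (w.count x : Int) = ↑(w.count item))).erase item := by
    apply Finset.ext
    intro x
    by_cases hx : x = item
    · subst hx
      simp only [Finset.mem_erase, ne_eq, not_true_eq_false, false_and, iff_false,
        Finset.mem_filter, List.mem_toFinset, List.count_append]
      intro ⟨_, hc⟩
      simp at hc
    · have : List.count x [item] = 0 := List.count_eq_zero.mpr (by simp [hx])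
      simp [List.count_append, hx, this, Finset.mem_erase]
  rw [hset, Finset.card_erase_of_mem hmem]
  exact ⟨rfl, Finset.card_pos.mpr ⟨item, hmem⟩⟩

lemma card_toFinset_append (w : List Int) (item : Int) :
    (w ++ [item]).toFinset.card = w.toFinset.card + (if item ∈ w then 0 else 1) := by
  rw [List.toFinset_append]
  simp only [List.toFinset_cons, List.toFinset_nil, insert_empty_eq]
  by_cases h : item ∈ w
  · rw [Finset.union_eq_left.mpr (by simp [h])]
    simp [h]
  · rw [Finset.union_comm, Finset.singleton_union, Finset.card_insert_of_notMem (by simp [h])]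
    simp [h]

-- ---- the two loop conditions both decide Bal ----

lemma valuesA_nil_iff (d : PySem.Dict Int Int) (w : List Int) (h : InvA d w) :
    d.values = [] ↔ w = [] := by
  obtain ⟨hnd, hget, hcon⟩ := h
  have hkeys : d.values = [] ↔ d.keys = [] := by
    rw [PySem.Dict.values_eq_map_keys d hnd 0]
    simp
  rw [hkeys]
  constructor
  · intro hk
    by_contra hw
    obtain ⟨a, ha⟩ := List.exists_mem_of_ne_nil w hw
    have := (hcon a).mpr ha
    have := (PySem.Dict.contains_iff_mem_keys d a).mp this
    simp [hk] at this
  · intro hw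
    apply List.eq_nil_iff_forall_not_mem.mpr
    intro k hk
    have := (hcon k).mp ((PySem.Dict.contains_iff_mem_keys d k).mpr hk)
    simp [hw] at this

lemma condA_iff (d : PySem.Dict Int Int) (w : List Int) (h : InvA d w) (hw : w ≠ []) :
    (((PySem.List.max? d.values (fun v => v)).getD 0) - ((PySem.List.min? d.values (fun v => v)).getD 0) ≤ 1) ↔ Bal w := by
  obtain ⟨hnd, hget, hcon⟩ := h
  have hvs : d.values ≠ [] := by
    rw [ne_eq, valuesA_nil_iff d w ⟨hnd, hget, hcon⟩]; exact hw
  have hvals : d.values = d.keys.map (fun k => d.getD k 0) := PySem.Dict.values_eq_map_keys d hnd 0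
  obtain ⟨mx, hmx⟩ : ∃ mx, PySem.List.max? d.values (fun v => v) = some mx := by
    cases hmax : PySem.List.max? d.values (fun v => v) with
    | none => exact absurd ((PySem.List.max?_eq_none_iff _ _).mp hmax) hvs
    | some m => exact ⟨m, rfl⟩
  obtain ⟨mn, hmn⟩ : ∃ mn, PySem.List.min? d.values (fun v => v) = some mn := by
    cases hmin : PySem.List.min? d.values (fun v => v) with
    | none => exact absurd ((PySem.List.min?_eq_none_iff _ _).mp hmin) hvs
    | some m => exact ⟨m, rfl⟩
  have hmem_of_keys : ∀ x ∈ d.keys, x ∈ w := fun x hx =>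
    (hcon x).mp ((PySem.Dict.contains_iff_mem_keys d x).mpr hx)
  have hval_count : ∀ v ∈ d.values, ∃ x ∈ w, v = (w.count x : Int) := by
    intro v hv
    rw [hvals] at hv
    obtain ⟨x, hx, hvx⟩ := List.mem_map.mp hv
    exact ⟨x, hmem_of_keys x hx, by rw [← hvx, hget x]⟩
  have hcount_mem : ∀ x ∈ w, (w.count x : Int) ∈ d.values := by
    intro x hx
    rw [hvals]
    exact List.mem_map.mpr ⟨x, (PySem.Dict.contains_iff_mem_keys d x).mp ((hcon x).mpr hx), hget x⟩
  rw [hmx, hmn]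
  simp only [Option.getD_some]
  constructor
  · intro hle x hx y hy
    have h1 : (w.count x : Int) ≤ mx := PySem.List.max?_isMax hmx _ (hcount_mem x hx)
    have h2 : mn ≤ (w.count y : Int) := PySem.List.min?_isMin hmn _ (hcount_mem y hy)
    omega
  · intro hbal
    obtain ⟨xm, hxm, hxmv⟩ := hval_count mx (PySem.List.max?_mem hmx)
    obtain ⟨xn, hxn, hxnv⟩ := hval_count mn (PySem.List.min?_mem hmn)
    have := hbal xm hxm xn hxn
    omega

lemma bal_iff_occ (w : List Int) (hw : w ≠ []) :
    ((occ w (↑(w.length / w.toFinset.card)) : Int) + (occ w ((↑(w.length / w.toFinset.card)) + 1) : Int) = (w.toFinset.card : Int)) ↔ Bal w := by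
  have hS : w.toFinset.Nonempty := by
    obtain ⟨a, ha⟩ := List.exists_mem_of_ne_nil w hw
    exact ⟨a, List.mem_toFinset.mpr ha⟩
  set S := w.toFinset with hSdef
  set n := S.card with hndef
  have hn : 0 < n := Finset.card_pos.mpr hS
  set q := w.length / n with hqdef
  have hsum : ∑ x ∈ S, w.count x = w.length := List.sum_toFinset_count_eq_length w
  constructor
  · intro h
    have h' : occ w ↑q + occ w (↑q + 1) = n := by exact_mod_cast h
    have hA : occ w ↑q = (S.filter (fun x => w.count x = q)).card := by
      unfold occ
      congr 1
      apply Finset.filter_congr; intro x _; simp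
    have hB : occ w (↑q + 1) = (S.filter (fun x => w.count x = q + 1)).card := by
      unfold occ
      congr 1
      apply Finset.filter_congr; intro x _
      constructor
      · intro hx; have : w.count x = q + 1 := by exact_mod_cast hx
        simp [this]
      · intro hx; have : w.count x = q + 1 := by simpa using hx
        simp [this]
    have hdisj : Disjoint (S.filter (fun x => w.count x = q)) (S.filter (fun x => w.count x = q + 1)) := by
      apply Finset.disjoint_filter_filter'
      rw [disjoint_iff_inf_le]
      intro x hx
      simp only [Pi.inf_apply, inf_Prop_eq] at hx
      omega
    have hcard : ((S.filter (fun x => w.count x = q)) ∪ (S.filter (fun x => w.count x = q + 1))).card = n := by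
      rw [Finset.card_union_of_disjoint hdisj, ← hA, ← hB]; exact h'
    have hfull : (S.filter (fun x => w.count x = q)) ∪ (S.filter (fun x => w.count x = q + 1)) = S := by
      apply Finset.eq_of_subset_of_card_le
      · exact Finset.union_subset (Finset.filter_subset _ _) (Finset.filter_subset _ _)
      · rw [hcard]
    have hall : ∀ x ∈ w, w.count x = q ∨ w.count x = q + 1 := by
      intro x hx
      have hxS : x ∈ S := List.mem_toFinset.mpr hx
      rw [← hfull] at hxS
      rcases Finset.mem_union.mp hxS with h1 | h1 <;> [left; right] <;>
        exact (Finset.mem_filter.mp h1).2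
    intro x hx y hy
    rcases hall x hx with h1 | h1 <;> rcases hall y hy with h2 | h2 <;> omega
  · intro hbal
    obtain ⟨x0, hx0S, hx0min⟩ := Finset.exists_min_image S (fun x => w.count x) hS
    set m := w.count x0 with hmdef
    have hx0w : x0 ∈ w := List.mem_toFinset.mp hx0S
    have hall : ∀ x ∈ S, w.count x = m ∨ w.count x = m + 1 := by
      intro x hxS
      have hxw : x ∈ w := List.mem_toFinset.mp hxS
      have h1 := hx0min x hxS
      have h2 := hbal x hxw x0 hx0w
      omega
    set A := S.filter (fun x => w.count x = m) with hAdef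
    set B := S.filter (fun x => w.count x = m + 1) with hBdef
    have hdisj : Disjoint A B := by
      apply Finset.disjoint_filter_filter'
      rw [disjoint_iff_inf_le]
      intro x hx
      simp only [Pi.inf_apply, inf_Prop_eq] at hx
      omega
    have hfull : A ∪ B = S := by
      apply Finset.Subset.antisymm
      · exact Finset.union_subset (Finset.filter_subset _ _) (Finset.filter_subset _ _)
      · intro x hxS
        rcases hall x hxS with h1 | h1
        · exact Finset.mem_union_left _ (Finset.mem_filter.mpr ⟨hxS, h1⟩)
        · exact Finset.mem_union_right _ (Finset.mem_filter.mpr ⟨hxS, h1⟩)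
    have hcards : A.card + B.card = n := by
      rw [← Finset.card_union_of_disjoint hdisj, hfull]
    have hx0A : x0 ∈ A := Finset.mem_filter.mpr ⟨hx0S, rfl⟩
    have hApos : 0 < A.card := Finset.card_pos.mpr ⟨x0, hx0A⟩
    have hsum2 : w.length = A.card * m + B.card * (m + 1) := by
      rw [← hsum, ← hfull, Finset.sum_union hdisj]
      congr 1
      · rw [Finset.sum_congr rfl (fun x hx => (Finset.mem_filter.mp hx).2), Finset.sum_const, smul_eq_mul]
      · rw [Finset.sum_congr rfl (fun x hx => (Finset.mem_filter.mp hx).2), Finset.sum_const, smul_eq_mul]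
    have hBlt : B.card < n := by omega
    have hlen : w.length = n * m + B.card := by
      rw [hsum2, ← hcards]; ring
    have hqm : q = m := by
      rw [hqdef, hlen, Nat.mul_add_div hn, Nat.div_eq_of_lt hBlt]
      omega
    have hA' : occ w ↑q = A.card := by
      unfold occ
      congr 1
      apply Finset.filter_congr; intro x _
      rw [hqm]; simp
    have hB' : occ w (↑q + 1) = B.card := by
      unfold occ
      congr 1
      apply Finset.filter_congr; intro x _
      rw [hqm]
      constructor
      · intro hx; have : w.count x = m + 1 := by exact_mod_cast hx
        simp [this]
      · intro hx; have : w.count x = m + 1 := by simpa using hx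
        simp [this]
    rw [hA', hB']
    exact_mod_cast hcards

-- ---- invariants at the start and through both update steps ----

lemma invA_empty : InvA PySem.Dict.empty [] := by
  refine ⟨PySem.Dict.nodup_keys_empty, ?_, ?_⟩ <;> intro x <;> simp [pysem]

lemma invB_empty : InvB PySem.Dict.empty PySem.Dict.empty 0 [] := by
  refine ⟨?_, ?_, ?_, ?_⟩
  · intro x; simp [pysem]
  · intro c _; simp [pysem, occ]
  · intro c _; simp [pysem]
  · simp

lemma invA_append (d : PySem.Dict Int Int) (w : List Int) (item : Int) (h : InvA d w) :
    InvA (d.insert item (d.getD item 0 + 1)) (w ++ [item]) := by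
  obtain ⟨hnd, hget, hcon⟩ := h
  refine ⟨PySem.Dict.nodup_keys_insert _ _ _ hnd, ?_, ?_⟩
  · intro y
    rw [PySem.Dict.getD_insert]
    by_cases hy : y = item
    · rw [if_pos hy, hy, hget, List.count_append]
      have h1 : List.count item [item] = 1 := by simp
      rw [h1]; push_cast; ring
    · have : List.count y [item] = 0 := List.count_eq_zero.mpr (by simp [hy])
      simp [hy, hget, List.count_append, this]
  · intro y
    rw [PySem.Dict.contains_insert]
    by_cases hy : y = item
    · subst hy; simp
    · rw [show (y == item) = false from beq_eq_false_iff_ne.mpr hy]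
      simp [hcon, hy]

lemma invA_cons (d : PySem.Dict Int Int) (x : Int) (t : List Int) (h : InvA d (x :: t)) :
    InvA (if d.getD x 0 - 1 = 0 then d.erase x else d.insert x (d.getD x 0 - 1)) t := by
  obtain ⟨hnd, hget, hcon⟩ := h
  have hc : d.getD x 0 = ↑(t.count x) + 1 := by
    rw [hget]; simp [List.count_cons_self]
  by_cases h0 : d.getD x 0 - 1 = 0
  · have hct : t.count x = 0 := by omega
    have hnotmem : x ∉ t := by rw [← List.count_eq_zero]; exact hct
    rw [if_pos h0]
    refine ⟨?_, ?_, ?_⟩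
    · rw [keys_erase]; exact List.Nodup.filter _ hnd
    · intro y
      by_cases hy : y = x
      · subst hy; rw [getD_erase_self, hct]; simp
      · rw [getD_erase_of_ne d x y 0 hy, hget]
        congr 1
        have hxy : ¬ x = y := fun hh => hy hh.symm
        simp [List.count_cons, hy, hxy]
    · intro y
      rw [contains_erase]
      by_cases hy : y = x
      · subst hy; simp [hnotmem]
      · simp [show (y == x) = false from beq_eq_false_iff_ne.mpr hy, hcon,
          List.mem_cons, hy]
  · have hct : 1 ≤ t.count x := by omega
    have hmem : x ∈ t := List.count_pos_iff.mp (by omega)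
    rw [if_neg h0]
    refine ⟨PySem.Dict.nodup_keys_insert _ _ _ hnd, ?_, ?_⟩
    · intro y
      rw [PySem.Dict.getD_insert]
      by_cases hy : y = x
      · subst hy; simp [hc]
      · have hxy : ¬ x = y := fun hh => hy hh.symm
        rw [if_neg hy, hget]
        congr 1
        simp [List.count_cons, hxy]
    · intro y
      rw [PySem.Dict.contains_insert]
      by_cases hy : y = x
      · subst hy; simp [hmem]
      · simp [show (y == x) = false from beq_eq_false_iff_ne.mpr hy, hcon,
          List.mem_cons, hy]

lemma invB_append (d f : PySem.Dict Int Int) (k : Int) (w : List Int) (item : Int)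
    (h : InvB d f k w) :
    InvB (d.insert item (d.getD item 0 + 1))
      ((if d.getD item 0 = 0 then f else f.insert (d.getD item 0) (f.getD (d.getD item 0) 0 - 1)).insert
        (d.getD item 0 + 1)
        ((if d.getD item 0 = 0 then f else f.insert (d.getD item 0) (f.getD (d.getD item 0) 0 - 1)).getD (d.getD item 0 + 1) 0 + 1))
      (if d.getD item 0 = 0 then k + 1 else k) (w ++ [item]) := by
  obtain ⟨hget, hpos, hzero, hk⟩ := h
  have hc : d.getD item 0 = ↑(w.count item) := hget item
  refine ⟨?_, ?_, ?_, ?_⟩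
  · intro y
    rw [PySem.Dict.getD_insert]
    by_cases hy : y = item
    · rw [if_pos hy, hy, hget, List.count_append]
      have h1 : List.count item [item] = 1 := by simp
      rw [h1]; push_cast; ring
    · have : List.count y [item] = 0 := List.count_eq_zero.mpr (by simp [hy])
      simp [hy, hget, List.count_append, this]
  · intro v hv
    by_cases h0 : d.getD item 0 = 0
    · have hcnt : w.count item = 0 := by omega
      rw [if_pos h0] at *
      rw [PySem.Dict.getD_insert]
      by_cases hv1 : v = d.getD item 0 + 1
      · rw [if_pos hv1, hv1, h0, zero_add]
        have hocc1 : occ (w ++ [item]) 1 = occ w 1 + 1 := by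
          simpa [hcnt] using occ_append_new w item
        rw [hocc1, hpos 1 (by norm_num)]
        push_cast; ring
      · rw [if_neg hv1, hpos v hv]
        congr 1
        exact (occ_append_ne w item v (by omega) (by omega)).symm
    · have hcnt : 1 ≤ w.count item := by omega
      rw [if_neg h0] at *
      rw [PySem.Dict.getD_insert]
      by_cases hv1 : v = d.getD item 0 + 1
      · rw [if_pos hv1, PySem.Dict.getD_insert, if_neg (by omega), hv1, hc]
        have := occ_append_new w item
        rw [this, hpos _ (by omega)]
        push_cast; ring
      · rw [if_neg hv1, PySem.Dict.getD_insert]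
        by_cases hv2 : v = d.getD item 0
        · rw [if_pos hv2, hv2, hc]
          obtain ⟨he, hge⟩ := occ_append_cur w item hcnt
          rw [he, hpos _ (by omega)]
          push_cast [hge]
          omega
        · rw [if_neg hv2, hpos v hv]
          congr 1
          exact (occ_append_ne w item v (by omega) (by omega)).symm
  · intro v hv
    by_cases h0 : d.getD item 0 = 0
    · rw [if_pos h0, PySem.Dict.getD_insert, if_neg (by omega)]
      exact hzero v hv
    · rw [if_neg h0, PySem.Dict.getD_insert, if_neg (by omega),
        PySem.Dict.getD_insert, if_neg (by omega)]
      exact hzero v hv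
  · rw [card_toFinset_append]
    by_cases h0 : d.getD item 0 = 0
    · have : item ∉ w := by rw [← List.count_eq_zero]; omega
      rw [if_pos h0, if_neg this, hk]
      push_cast; ring
    · have : item ∈ w := List.count_pos_iff.mp (by omega)
      rw [if_neg h0, if_pos this, hk]
      push_cast; ring

lemma invB_cons (d f : PySem.Dict Int Int) (k : Int) (x : Int) (t : List Int)
    (h : InvB d f k (x :: t)) :
    InvB (d.insert x (d.getD x 0 - 1))
      (if d.getD x 0 = 1 then f.insert (d.getD x 0) (f.getD (d.getD x 0) 0 - 1)
       else (f.insert (d.getD x 0) (f.getD (d.getD x 0) 0 - 1)).insert (d.getD x 0 - 1)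
              ((f.insert (d.getD x 0) (f.getD (d.getD x 0) 0 - 1)).getD (d.getD x 0 - 1) 0 + 1))
      (if d.getD x 0 = 1 then k - 1 else k) t := by
  obtain ⟨hget, hpos, hzero, hk⟩ := h
  have hperm : (x :: t).Perm (t ++ [x]) := (List.perm_append_singleton x t).symm
  have hcnt : (x :: t).count x = t.count x + 1 := by simp [List.count_cons_self]
  have hc : d.getD x 0 = ↑(t.count x) + 1 := by rw [hget, hcnt]; push_cast; ring
  have hoccE : ∀ v : Int, v ≠ ↑(t.count x) → v ≠ ↑(t.count x) + 1 → occ (x :: t) v = occ t v :=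
    fun v h1 h2 => (occ_perm hperm v).trans (occ_append_ne t x v h1 h2)
  have hoccNew : occ (x :: t) (↑(t.count x) + 1) = occ t (↑(t.count x) + 1) + 1 :=
    (occ_perm hperm _).trans (occ_append_new t x)
  refine ⟨?_, ?_, ?_, ?_⟩
  · intro y
    rw [PySem.Dict.getD_insert]
    by_cases hy : y = x
    · rw [if_pos hy, hy, hc]
      push_cast; ring
    · rw [if_neg hy, hget]
      congr 1
      have hxy : ¬ x = y := fun hh => hy hh.symm
      simp [List.count_cons, hxy]
  · intro v hv
    by_cases h1 : d.getD x 0 = 1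
    · have hct0 : t.count x = 0 := by omega
      rw [if_pos h1, PySem.Dict.getD_insert]
      by_cases hv1 : v = d.getD x 0
      · rw [if_pos hv1, hv1, h1, hpos 1 (by norm_num)]
        have hocc1 : occ (x :: t) 1 = occ t 1 + 1 := by
          simpa [hct0] using hoccNew
        rw [hocc1]
        push_cast; ring
      · rw [if_neg hv1, hpos v hv]
        congr 1
        exact hoccE v (by omega) (by omega)
    · have hct1 : 1 ≤ t.count x := by omega
      have hoccCur := occ_append_cur t x hct1
      have hoccC : occ t ↑(t.count x) = occ (x :: t) ↑(t.count x) + 1 := by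
        have h2 := (occ_perm hperm ↑(t.count x)).trans hoccCur.1
        omega
      rw [if_neg h1, PySem.Dict.getD_insert]
      by_cases hv1 : v = d.getD x 0 - 1
      · rw [if_pos hv1, PySem.Dict.getD_insert, if_neg (by omega), hv1, hc]
        rw [show (↑(t.count x) + 1 - 1 : Int) = ↑(t.count x) from by ring]
        rw [hpos _ (by omega), hoccC]
        push_cast; ring
      · rw [if_neg hv1, PySem.Dict.getD_insert]
        by_cases hv2 : v = d.getD x 0
        · rw [if_pos hv2, hv2, hc, hpos _ (by omega), hoccNew]
          push_cast; ring
        · rw [if_neg hv2, hpos v hv]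
          congr 1
          exact hoccE v (by omega) (by omega)
  · intro v hv
    by_cases h1 : d.getD x 0 = 1
    · rw [if_pos h1, PySem.Dict.getD_insert, if_neg (by omega)]
      exact hzero v hv
    · rw [if_neg h1, PySem.Dict.getD_insert, if_neg (by omega),
        PySem.Dict.getD_insert, if_neg (by omega)]
      exact hzero v hv
  · have hcard : (x :: t).toFinset.card = t.toFinset.card + (if x ∈ t then 0 else 1) := by
      rw [List.toFinset_cons]
      by_cases hxt : x ∈ t
      · rw [Finset.insert_eq_self.mpr (List.mem_toFinset.mpr hxt)]
        simp [hxt]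
      · rw [Finset.card_insert_of_notMem (by simp [hxt])]
        simp [hxt]
    by_cases h1 : d.getD x 0 = 1
    · have hxt : x ∉ t := by rw [← List.count_eq_zero]; omega
      rw [if_pos h1, hk, hcard, if_neg hxt]
      push_cast; ring
    · have hxt : x ∈ t := List.count_pos_iff.mp (by omega)
      rw [if_neg h1, hk, hcard, if_pos hxt]
      push_cast; ring

lemma shrink_bisim (seq : List Int) : ∀ (fuel : Nat) (l R : Nat) (dA dB f : PySem.Dict Int Int) (k : Int),
    l ≤ R → R ≤ seq.length →
    InvA dA (window seq l R) → InvB dB f k (window seq l R) →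
    ∃ (l' : Nat) (dA' dB' f' : PySem.Dict Int Int) (k' : Int), l ≤ l' ∧ l' ≤ R ∧
      shrinkA seq fuel dA ↑l = (dA', (l' : Int)) ∧
      shrinkB seq fuel dB f k ↑l ((R : Int) - 1) = (dB', f', k', (l' : Int)) ∧
      InvA dA' (window seq l' R) ∧ InvB dB' f' k' (window seq l' R) := by
  intro fuel
  induction fuel with
  | zero =>
    intro l R dA dB f k h1 h2 hA hB
    exact ⟨l, dA, dB, f, k, le_refl _, h1, rfl, rfl, hA, hB⟩
  | succ fuel ih =>
    intro l R dA dB f k h1 h2 hA hB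
    by_cases hw : window seq l R = []
    · -- empty window: both loops stop at once
      have hlR : l = R := by
        have := window_length seq l R h1 h2
        rw [hw] at this
        simp at this
        omega
      have hvsA : dA.values = [] := (valuesA_nil_iff dA _ hA).mpr hw
      obtain ⟨hget, hpos, hzero, hk⟩ := hB
      have hk0 : k = 0 := by rw [hk, hw]; simp
      have harg : (R : Int) - 1 - ↑l + 1 = 0 := by rw [hlR]; ring
      have hq : PySem.Int.floordiv ((R : Int) - 1 - ↑l + 1) k = 0 := by
        rw [harg, hk0]; decide
      have hcondB : f.getD 0 0 + f.getD (0 + 1) 0 = k := by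
        rw [hzero 0 (by norm_num), hk0]
        have := hpos 1 (by norm_num)
        rw [hw] at this
        simp only [occ] at this
        simp at this
        simp [this]
      refine ⟨l, dA, dB, f, k, le_refl _, h1, ?_, ?_, hA, ⟨hget, hpos, hzero, hk⟩⟩
      · simp only [shrinkA]
        rw [if_pos hvsA]
      · simp only [shrinkB]
        rw [hq, if_pos hcondB]
    · -- nonempty window
      have hlltR : l < R := by
        by_contra hc
        have : R - l = 0 := by omega
        apply hw
        unfold window
        rw [this]
        simp
      have hlen : l < seq.length := by omega
      obtain ⟨hget, hpos, hzero, hk⟩ := hB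
      -- B's O(1) test equals A's max-min test: both decide Bal
      have hwl : (window seq l R).length = R - l := window_length seq l R h1 h2
      have hcard_pos : 0 < (window seq l R).toFinset.card := by
        apply Finset.card_pos.mpr
        obtain ⟨a, ha⟩ := List.exists_mem_of_ne_nil _ hw
        exact ⟨a, List.mem_toFinset.mpr ha⟩
      have hcard_le : (window seq l R).toFinset.card ≤ (window seq l R).length :=
        List.toFinset_card_le _
      have hq1 : 1 ≤ (window seq l R).length / (window seq l R).toFinset.card :=
        (Nat.one_le_div_iff hcard_pos).mpr hcard_le
      have harg : (R : Int) - 1 - ↑l + 1 = ((R - l : Nat) : Int) := by push_cast; omega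
      have hq : PySem.Int.floordiv ((R : Int) - 1 - ↑l + 1) k
          = ((((window seq l R).length / (window seq l R).toFinset.card : Nat)) : Int) := by
        rw [harg, hk, ← hwl, PySem.Int.floordiv_natCast]
      have hcondB : (f.getD (PySem.Int.floordiv ((R : Int) - 1 - ↑l + 1) k) 0 +
          f.getD (PySem.Int.floordiv ((R : Int) - 1 - ↑l + 1) k + 1) 0 = k) ↔ Bal (window seq l R) := by
        rw [hq, hpos _ (by exact_mod_cast hq1), hpos _ (by push_cast; omega), hk]
        exact bal_iff_occ (window seq l R) hw
      have hvsA : ¬ (dA.values = []) := by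
        intro hcc; exact hw ((valuesA_nil_iff dA _ hA).mp hcc)
      have hcondA := condA_iff dA _ hA hw
      by_cases hb : Bal (window seq l R)
      · -- balanced: both break
        refine ⟨l, dA, dB, f, k, le_refl _, h1, ?_, ?_, hA, ⟨hget, hpos, hzero, hk⟩⟩
        · simp only [shrinkA]
          rw [if_neg hvsA, if_pos (hcondA.mpr hb)]
        · simp only [shrinkB]
          rw [if_pos (hcondB.mpr hb)]
      · -- unbalanced: both shrink by one and recurse
        have hx : (PySem.List.pyGet? seq (l : Int)).getD 0 = seq[l] := by
          rw [PySem.List.pyGet?_natCast, List.getElem?_eq_getElem hlen]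
          rfl
        have hwcons : window seq l R = seq[l] :: window seq (l + 1) R :=
          window_cons seq l R hlltR hlen
        have hA2 : InvA (if dA.getD seq[l] 0 - 1 = 0 then dA.erase seq[l]
            else dA.insert seq[l] (dA.getD seq[l] 0 - 1)) (window seq (l + 1) R) := by
          have := invA_cons dA seq[l] (window seq (l + 1) R) (by rw [← hwcons]; exact hA)
          exact this
        have hBstep := invB_cons dB f k seq[l] (window seq (l + 1) R)
          (by rw [← hwcons]; exact ⟨hget, hpos, hzero, hk⟩)
        obtain ⟨l', dA', dB', f', k', hll', hl'R, hsA, hsB, hA', hB'⟩ :=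
          ih (l + 1) R
            (if dA.getD seq[l] 0 - 1 = 0 then dA.erase seq[l] else dA.insert seq[l] (dA.getD seq[l] 0 - 1))
            (dB.insert seq[l] (dB.getD seq[l] 0 - 1))
            (if dB.getD seq[l] 0 = 1 then f.insert (dB.getD seq[l] 0) (f.getD (dB.getD seq[l] 0) 0 - 1)
             else (f.insert (dB.getD seq[l] 0) (f.getD (dB.getD seq[l] 0) 0 - 1)).insert (dB.getD seq[l] 0 - 1)
                    ((f.insert (dB.getD seq[l] 0) (f.getD (dB.getD seq[l] 0) 0 - 1)).getD (dB.getD seq[l] 0 - 1) 0 + 1))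
            (if dB.getD seq[l] 0 = 1 then k - 1 else k)
            (by omega) h2 hA2 hBstep
        refine ⟨l', dA', dB', f', k', by omega, hl'R, ?_, ?_, hA', hB'⟩
        · simp only [shrinkA]
          rw [if_neg hvsA, if_neg (fun hcc => hb (hcondA.mp hcc)), hx]
          have hcast : (l : Int) + 1 = ((l + 1 : Nat) : Int) := by push_cast; ring
          split_ifs with hc0
          · rw [hcast]
            rw [if_pos hc0] at hsA
            exact hsA
          · rw [hcast]
            rw [if_neg hc0] at hsA
            exact hsA
        · simp only [shrinkB]
          rw [if_neg (fun hcc => hb (hcondB.mp hcc)), hx]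
          have hcast : (l : Int) + 1 = ((l + 1 : Nat) : Int) := by push_cast; ring
          split_ifs with hc1
          · rw [hcast]
            simp only [if_pos hc1] at hsB
            exact hsB
          · rw [hcast]
            simp only [if_neg hc1] at hsB
            exact hsB

lemma go_bisim (seq : List Int) : ∀ (rest : List Int) (r l : Nat) (dA dB f : PySem.Dict Int Int) (k bl bs be : Int),
    rest = seq.drop r → l ≤ r → r ≤ seq.length →
    InvA dA (window seq l r) → InvB dB f k (window seq l r) →
    goA seq rest ↑r dA ↑l bl bs be = goB seq rest ↑r dB f k ↑l bl bs be := by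
  intro rest
  induction rest with
  | nil => intro r l dA dB f k bl bs be _ _ _ _ _; simp only [goA, goB]
  | cons item rest' ih =>
    intro r l dA dB f k bl bs be hdrop h1 h2 hA hB
    have hr : r < seq.length := by
      by_contra hc
      have : seq.drop r = [] := List.drop_eq_nil_of_le (by omega)
      rw [this] at hdrop
      exact List.cons_ne_nil _ _ hdrop
    have hdropped : seq.drop r = seq[r] :: seq.drop (r + 1) := List.drop_eq_getElem_cons hr
    rw [hdropped] at hdrop
    have hitem : item = seq[r] := (List.cons.injEq _ _ _ _ ▸ hdrop).1
    have hrest : rest' = seq.drop (r + 1) := (List.cons.injEq _ _ _ _ ▸ hdrop).2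
    have hwapp : window seq l (r + 1) = window seq l r ++ [seq[r]] :=
      window_append seq l r h1 hr
    have hA1 : InvA (dA.insert seq[r] (dA.getD seq[r] 0 + 1)) (window seq l (r + 1)) := by
      rw [hwapp]; exact invA_append dA _ seq[r] hA
    have hB1 := invB_append dB f k (window seq l r) seq[r] hB
    rw [← hwapp] at hB1
    obtain ⟨l', dA', dB', f', k', hll', hl'R, hsA, hsB, hA', hB'⟩ :=
      shrink_bisim seq (seq.length + 1) l (r + 1)
        (dA.insert seq[r] (dA.getD seq[r] 0 + 1))
        (dB.insert seq[r] (dB.getD seq[r] 0 + 1))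
        ((if dB.getD seq[r] 0 = 0 then f else f.insert (dB.getD seq[r] 0) (f.getD (dB.getD seq[r] 0) 0 - 1)).insert
          (dB.getD seq[r] 0 + 1)
          ((if dB.getD seq[r] 0 = 0 then f else f.insert (dB.getD seq[r] 0) (f.getD (dB.getD seq[r] 0) 0 - 1)).getD (dB.getD seq[r] 0 + 1) 0 + 1))
        (if dB.getD seq[r] 0 = 0 then k + 1 else k)
        (by omega) (by omega) hA1 hB1
    rw [show (((r + 1 : Nat)) : Int) - 1 = (r : Int) from by push_cast; ring] at hsB
    simp only [goA, goB]
    rw [hitem, hsA, hsB]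
    simp only
    have hcast : (r : Int) + 1 = ((r + 1 : Nat) : Int) := by push_cast; ring
    split_ifs with hcond
    · rw [hcast]
      exact ih (r + 1) l' dA' dB' f' k' _ _ _ hrest (by omega) (by omega) hA' hB'
    · rw [hcast]
      exact ih (r + 1) l' dA' dB' f' k' _ _ _ hrest (by omega) (by omega) hA' hB'

-- ===== VERDICT (by name: the statement is the Claim_ definition above) =====
theorem longest_simple_balanced_subsequence_spec : Claim_equal_longest_simple_balanced_subsequence := by
  intro seq _
  unfold Spec_longest_simple_balanced_subsequence longest_simple_balanced_subsequence longest_simple_balanced_subsequence_alt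
  have h := go_bisim seq seq 0 0 PySem.Dict.empty PySem.Dict.empty PySem.Dict.empty 0 0 0 0 (by simp) (le_refl 0) (by simp) (by rw [window_nil]; exact invA_empty) (by rw [window_nil]; exact invB_empty)
  simpa using h
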